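-- pv_equiv track=rewrite | github.com/evanarlian/kaggle-llmse | src/searcher.py | remove_common_suffix_prefix
-- ===== SOURCE A (Python) =====
-- def remove_common_suffix_prefix(texts: list[str]) -> list[str]:
--     splitted = [text.split() for text in texts]
--     n_prefix = 0
--     for elems in zip(*splitted):  # transpose
--         if len(set(elems)) == 1:
--             n_prefix += 1
--         else:
--             break
--     splitted_reversed = [s[::-1] for s in splitted]
--     n_suffix = 0
--     for elems in zip(*splitted_reversed):  # transpose
--         if len(set(elems)) == 1:
--             n_suffix += 1
--         else:
--             break
--     # len(s) - n_suffix is used instead of [:-n_suffix]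
--     # because [:] is not the same as [:-0]
--     return [" ".join(s[n_prefix : len(s) - n_suffix]) for s in splitted]
-- ===== SOURCE B (Python) =====
-- def remove_common_suffix_prefix(texts: list[str]) -> list[str]:
--     if not texts:
--         return []
--     splitted = [text.split() for text in texts]
--
--     def common(a, b):
--         out = []
--         for x, y in zip(a, b):
--             if x != y:
--                 break
--             out.append(x)
--         return out
--
--     pre = splitted[0]
--     for s in splitted[1:]:
--         pre = common(pre, s)
--     suf = splitted[0][::-1]
--     for s in splitted[1:]:
--         suf = common(suf, s[::-1])
--     n_pre, n_suf = len(pre), len(suf)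
--     return [" ".join(s[n_pre : len(s) - n_suf]) for s in splitted]
-- ===== Notes on version B (the rewrite author's own statement) =====
-- stated objective: alternative
-- what changed: Replaces A's zip-transpose with a per-column set-cardinality test by a pairwise fold of a two-list common-prefix helper over the word lists (and over the reversed word lists for the suffix), guarding the empty input explicitly.
import Mathlib
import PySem

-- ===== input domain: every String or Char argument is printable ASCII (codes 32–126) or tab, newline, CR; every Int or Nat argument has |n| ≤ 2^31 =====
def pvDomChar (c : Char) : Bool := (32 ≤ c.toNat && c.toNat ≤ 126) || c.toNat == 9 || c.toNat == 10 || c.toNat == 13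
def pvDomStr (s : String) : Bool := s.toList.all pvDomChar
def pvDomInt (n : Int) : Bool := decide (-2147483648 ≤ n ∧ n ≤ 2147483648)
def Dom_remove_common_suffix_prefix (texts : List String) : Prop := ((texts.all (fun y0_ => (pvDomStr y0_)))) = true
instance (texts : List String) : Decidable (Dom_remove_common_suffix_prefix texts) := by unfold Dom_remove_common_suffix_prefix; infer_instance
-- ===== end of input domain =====

-- B replaces A's zip-transpose + per-column set test by a pairwise fold of a common-prefix
-- helper over the word lists (and over the reversed word lists for the suffix); objective: alternative.

-- ===== PORT A =====
-- zip(*rows): columns up to the shortest row (zip() with no iterables is empty)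
def pvZipStar : List (List String) → List (List String)
  | [] => []
  | r :: rs =>
    if (r :: rs).any List.isEmpty then []
    else ((r :: rs).map (fun x => x.headD "")) :: pvZipStar ((r :: rs).map List.tail)
termination_by rows => (rows.headD []).length
decreasing_by
  rename_i h
  simp only [List.any_eq_true, List.isEmpty_iff, not_exists, not_and] at h
  simp only [List.map_cons, List.headD_cons]
  have hr : r ≠ [] := h r (by simp)
  cases r with
  | nil => exact absurd rfl hr
  | cons a as => simp

-- the for/break loop counting leading columns whose set has one element
def pvCountEq : List (List String) → Nat
  | [] => 0
  | col :: cols =>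
    if PySem.Set.len (PySem.Set.ofList col) == 1 then pvCountEq cols + 1 else 0

def remove_common_suffix_prefix (texts : List String) : List String :=
  let splitted := texts.map PySem.Str.split₀
  let nP := pvCountEq (pvZipStar splitted)
  -- s[::-1] is List.reverse (PySem.List.slice?_none_none_neg_one)
  let splittedRev := splitted.map List.reverse
  let nS := pvCountEq (pvZipStar splittedRev)
  splitted.map (fun s =>
    PySem.Str.join " " (PySem.List.slice s (some (nP : Int)) (some ((s.length : Int) - (nS : Int)))))

-- ===== PORT B =====
-- common(a, b): leading elements on which a and b agree (stops at first mismatch or end)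
def pvCommon : List String → List String → List String
  | x :: xs, y :: ys => if x = y then x :: pvCommon xs ys else []
  | _, _ => []

def remove_common_suffix_prefix_alt (texts : List String) : List String :=
  match texts.map PySem.Str.split₀ with
  | [] => []
  | s0 :: rest =>
    let pre := rest.foldl pvCommon s0
    let suf := rest.foldl (fun acc s => pvCommon acc s.reverse) s0.reverse
    (s0 :: rest).map (fun s =>
      PySem.Str.join " " (PySem.List.slice s (some (pre.length : Int)) (some ((s.length : Int) - (suf.length : Int)))))

-- ===== PRECONDITION & SPEC =====
def Spec_remove_common_suffix_prefix (texts : List String) (out : List String) : Prop := out = remove_common_suffix_prefix_alt texts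
instance (texts : List String) (out : List String) : Decidable (Spec_remove_common_suffix_prefix texts out) := by unfold Spec_remove_common_suffix_prefix; infer_instance

-- ===== CLAIM (what is proved, stated in full; the proofs are below) =====
def Claim_equal_remove_common_suffix_prefix : Prop := ∀ (texts : List String), Dom_remove_common_suffix_prefix texts → Spec_remove_common_suffix_prefix texts (remove_common_suffix_prefix texts)

-- ===== LEMMAS AND PROOFS =====

theorem pvCommon_nil_left (b : List String) : pvCommon [] b = [] := by
  cases b <;> rfl

theorem foldl_pvCommon_nil (rs : List (List String)) : rs.foldl pvCommon [] = [] := by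
  induction rs with
  | nil => rfl
  | cons r rs ih => simpa [pvCommon_nil_left] using ih

theorem foldl_pvCommon_break (rs : List (List String)) (acc : List String)
    (h : String) (t : List String)
    (hacc : acc = [] ∨ ∃ t', acc = h :: t')
    (hw : ∃ r ∈ rs, r.head? ≠ some h) :
    rs.foldl pvCommon acc = [] := by
  induction rs generalizing acc with
  | nil => exact absurd hw (by simp)
  | cons r rs ih =>
    rcases hacc with rfl | ⟨t', rfl⟩
    · simpa [pvCommon_nil_left] using foldl_pvCommon_nil rs
    · by_cases hr : r.head? = some h
      · cases r with
        | nil => simp at hr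
        | cons y ys =>
          have hy : y = h := by simpa using hr
          have hw' : ∃ r ∈ rs, r.head? ≠ some h := by
            rcases hw with ⟨w, hwmem, hwne⟩
            rcases List.mem_cons.mp hwmem with rfl | hm
            · exact absurd hr hwne
            · exact ⟨w, hm, hwne⟩
          refine ih (pvCommon (h :: t') (y :: ys)) ?_ hw'
          right
          exact ⟨pvCommon t' ys, by simp [pvCommon, hy]⟩
      · have hz : pvCommon (h :: t') r = [] := by
          cases r with
          | nil => rfl
          | cons y ys =>
            have hne : h ≠ y := by
              simp only [List.head?_cons] at hr
              exact fun hh => hr (by simp [hh])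
            simp [pvCommon, hne]
        simpa [hz] using foldl_pvCommon_nil rs

theorem foldl_pvCommon_cons (rs : List (List String)) (h : String) (t : List String)
    (hall : ∀ r ∈ rs, r.head? = some h) :
    rs.foldl pvCommon (h :: t) = h :: (rs.map List.tail).foldl pvCommon t := by
  induction rs generalizing t with
  | nil => rfl
  | cons r rs ih =>
    cases r with
    | nil => simpa using hall [] (by simp)
    | cons y ys =>
      have hy : y = h := by simpa using hall (y :: ys) (by simp)
      subst hy
      simp only [List.foldl_cons, List.map_cons, List.tail_cons]
      rw [show pvCommon (y :: t) (y :: ys) = y :: pvCommon t ys from by simp [pvCommon]]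
      exact ih (pvCommon t ys) (fun r hr => hall r (by simp [hr]))

theorem setOfList_all_eq (x : String) (xs : List String)
    (hall : ∀ y ∈ xs, y = x) : PySem.Set.ofList (x :: xs) = [x] := by
  have base : ∀ (l : List String), (∀ y ∈ l, y = x) → l.foldl PySem.Set.add [x] = [x] := by
    intro l
    induction l with
    | nil => intro _; rfl
    | cons y ys ih =>
      intro hl
      have hy : y = x := hl y (by simp)
      subst hy
      have : PySem.Set.add [y] y = [y] := by simp [PySem.Set.add, PySem.Set.contains]
      simp only [List.foldl_cons, this]
      exact ih (fun z hz => hl z (by simp [hz]))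
  rw [PySem.Set.ofList_eq_foldl]
  simp only [List.foldl_cons]
  rw [show PySem.Set.add ([] : List String) x = [x] from rfl]
  exact base xs hall

theorem setLen_one_iff (x : String) (xs : List String) :
    PySem.Set.len (PySem.Set.ofList (x :: xs)) = 1 ↔ ∀ y ∈ xs, y = x := by
  constructor
  · intro h1
    have hlen : (PySem.Set.ofList (x :: xs) : List String).length = 1 := by
      simpa [PySem.Set.len] using h1
    rcases List.length_eq_one_iff.mp hlen with ⟨a, ha⟩
    have hx : x = a := by
      have := (PySem.Set.mem_ofList (x :: xs) x).mpr (by simp)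
      rw [ha] at this; simpa using this
    intro y hy
    have := (PySem.Set.mem_ofList (x :: xs) y).mpr (by simp [hy])
    rw [ha] at this
    simpa [hx] using this
  · intro hall
    rw [setOfList_all_eq x xs hall]
    rfl

-- the central lemma: A's column count = length of B's fold
theorem count_eq_fold (s0 : List String) (rest : List (List String)) :
    pvCountEq (pvZipStar (s0 :: rest)) = (rest.foldl pvCommon s0).length := by
  induction s0 generalizing rest with
  | nil =>
    rw [foldl_pvCommon_nil]
    simp [pvZipStar, pvCountEq]
  | cons h t ih =>
    by_cases hall : ∀ r ∈ rest, r.head? = some h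
    · -- every row starts with h
      have hne : ¬ ((h :: t) :: rest).any List.isEmpty := by
        simp only [List.any_eq_true, List.isEmpty_iff, not_exists, not_and]
        intro r hr
        rcases List.mem_cons.mp hr with rfl | hm
        · simp
        · intro hrnil; subst hrnil; simpa using hall [] hm
      rw [pvZipStar, if_neg hne]
      have hcol : ((h :: t) :: rest).map (fun x => x.headD "") = h :: rest.map (fun x => x.headD "") := by
        simp
      rw [hcol]
      have hcond : PySem.Set.len (PySem.Set.ofList (h :: rest.map (fun x => x.headD ""))) = 1 := by
        rw [setLen_one_iff]
        intro y hy
        rcases List.mem_map.mp hy with ⟨r, hr, rfl⟩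
        have := hall r hr
        cases r with
        | nil => simp at this
        | cons a as => simpa using this
      rw [pvCountEq, if_pos (by simpa using hcond)]
      rw [foldl_pvCommon_cons rest h t hall]
      have hmap : ((h :: t) :: rest).map List.tail = t :: rest.map List.tail := by simp
      rw [hmap, ih]
      simp
    · -- some row does not start with h: both sides are 0 / []
      push Not at hall
      rw [foldl_pvCommon_break rest (h :: t) h t (Or.inr ⟨t, rfl⟩) hall]
      by_cases hemp : ((h :: t) :: rest).any List.isEmpty
      · rw [pvZipStar, if_pos hemp]; rfl
      · rw [pvZipStar, if_neg hemp]
        rcases hall with ⟨w, hwmem, hwne⟩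
        have hwne' : w ≠ [] := by
          intro hnil; subst hnil
          simp only [List.any_eq_true, List.isEmpty_iff, not_exists, not_and] at hemp
          exact hemp [] (by simp [hwmem]) rfl
        have hcond : ¬ PySem.Set.len (PySem.Set.ofList (((h :: t) :: rest).map (fun x => x.headD ""))) = 1 := by
          have hcol : ((h :: t) :: rest).map (fun x => x.headD "") = h :: rest.map (fun x => x.headD "") := by simp
          rw [hcol, setLen_one_iff]
          intro hforall
          have : w.headD "" = h := hforall (w.headD "") (List.mem_map.mpr ⟨w, hwmem, rfl⟩)
          cases w with
          | nil => exact hwne' rfl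
          | cons a as => exact hwne (by simpa using congrArg some this)
        rw [pvCountEq, if_neg (by simpa using hcond)]
        rfl

-- ===== VERDICT (by name: the statement is the Claim_ definition above) =====
theorem remove_common_suffix_prefix_spec : Claim_equal_remove_common_suffix_prefix := by
  intro texts _
  unfold Spec_remove_common_suffix_prefix remove_common_suffix_prefix remove_common_suffix_prefix_alt
  cases htx : texts.map PySem.Str.split₀ with
  | nil => simp
  | cons s0 rest =>
    simp only []
    have hpre : pvCountEq (pvZipStar (s0 :: rest)) = (rest.foldl pvCommon s0).length :=
      count_eq_fold s0 rest
    have hsufmap : (s0 :: rest).map List.reverse = s0.reverse :: rest.map List.reverse := by simp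
    have hsuf : pvCountEq (pvZipStar ((s0 :: rest).map List.reverse))
        = (rest.foldl (fun acc s => pvCommon acc s.reverse) s0.reverse).length := by
      rw [hsufmap, count_eq_fold, List.foldl_map]
    rw [hpre, hsuf]
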